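-- pv_equiv track=rewrite | github.com/logicandgit/courses | class_4/less4_2.py | check_uniqueness_array
-- ===== SOURCE A (Python) =====
-- def check_uniqueness_array(array):
--     """Check the unique elements of the two-dimensional list.
--
--     :array: Check the unique elements of the two-dimensional list.
--     :returns: "Unique" or "Not unique"
--
--     """
--     res = []
--     len_arrays = 0
--
--     for i in range(len(array)):
--         len_arrays += len(array[i])
--         for y in range(len(array[i])):
--             res.append(array[i][y])
--
--     if len(set(res)) == len_arrays:
--         return "Unique"
--     return "Not unique"
-- ===== SOURCE B (Python) =====
-- def check_uniqueness_array(array):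
--     """Check the unique elements of the two-dimensional list.
--
--     Single pass with a seen-set and early exit instead of flattening,
--     counting lengths and comparing set sizes.
--     """
--     seen = set()
--     for row in array:
--         for x in row:
--             if x in seen:
--                 return "Not unique"
--             seen.add(x)
--     return "Unique"
-- ===== Notes on version B (the rewrite author's own statement) =====
-- stated objective: simpler
-- what changed: Replaces A's flatten-into-list + length counter + set-size comparison with a single early-exit scan that maintains a seen set and returns 'Not unique' at the first repeated element.
import Mathlib
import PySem

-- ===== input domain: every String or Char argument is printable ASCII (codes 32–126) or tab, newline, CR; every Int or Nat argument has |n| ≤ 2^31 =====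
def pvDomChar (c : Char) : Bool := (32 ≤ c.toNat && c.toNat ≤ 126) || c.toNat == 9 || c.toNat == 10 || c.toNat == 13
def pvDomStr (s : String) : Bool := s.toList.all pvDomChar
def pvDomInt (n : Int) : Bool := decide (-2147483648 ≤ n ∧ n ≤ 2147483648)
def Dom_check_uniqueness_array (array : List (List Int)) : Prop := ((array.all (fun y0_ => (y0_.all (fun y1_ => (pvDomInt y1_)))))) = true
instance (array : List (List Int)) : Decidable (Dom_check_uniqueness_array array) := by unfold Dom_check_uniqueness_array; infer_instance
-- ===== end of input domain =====

-- B replaces A's flatten + length counter + set-size comparison with one early-exit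
-- seen-set scan (objective: simpler).

-- ===== PORT A =====
def check_uniqueness_array (array : List (List Int)) : String :=
  let st := (PySem.List.pyRange 0 (PySem.List.len array) 1).foldl
    (fun (st : List Int × Int) i =>
      let row := PySem.List.pyGetD array i []
      let len_arrays := st.2 + PySem.List.len row
      let res := (PySem.List.pyRange 0 (PySem.List.len row) 1).foldl
        (fun res y => res ++ [PySem.List.pyGetD row y 0]) st.1
      (res, len_arrays)) ([], 0)
  if PySem.Set.len (PySem.Set.ofList st.1) == st.2 then "Unique" else "Not unique"

-- ===== PORT B =====
def pvScanRow : PySem.Set Int → List Int → Option (PySem.Set Int)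
  | seen, [] => some seen
  | seen, x :: xs =>
    if PySem.Set.contains seen x then none else pvScanRow (PySem.Set.add seen x) xs

def pvScanRows : PySem.Set Int → List (List Int) → String
  | _, [] => "Unique"
  | seen, r :: rs =>
    match pvScanRow seen r with
    | none => "Not unique"
    | some seen' => pvScanRows seen' rs

def check_uniqueness_array_alt (array : List (List Int)) : String :=
  pvScanRows PySem.Set.empty array

-- ===== PRECONDITION & SPEC =====
def Spec_check_uniqueness_array (array : List (List Int)) (out : String) : Prop := out = check_uniqueness_array_alt array
instance (array : List (List Int)) (out : String) : Decidable (Spec_check_uniqueness_array array out) := by unfold Spec_check_uniqueness_array; infer_instance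

-- ===== CLAIM (what is proved, stated in full; the proofs are below) =====
def Claim_equal_check_uniqueness_array : Prop := ∀ (array : List (List Int)), Dom_check_uniqueness_array array → Spec_check_uniqueness_array array (check_uniqueness_array array)

-- ===== LEMMAS AND PROOFS =====

-- A's accumulated state is (flatten, length of flatten).
theorem pvA_foldl (array : List (List Int)) (acc : List Int) (n : Int) :
    array.foldl (fun (st : List Int × Int) row => (st.1 ++ row, st.2 + (row.length : Int))) (acc, n)
      = (acc ++ array.flatten, n + (array.flatten.length : Int)) := by
  induction array generalizing acc n with
  | nil => simp
  | cons r rs ih =>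
    rw [List.foldl_cons, ih]
    simp only [List.flatten_cons, Prod.mk.injEq, List.append_assoc, List.length_append]
    exact ⟨trivial, by push_cast; ring⟩

-- |set(l)| = |l| iff l has no duplicates.
theorem pvOfList_length_iff (l : List Int) :
    ((PySem.Set.ofList l).length = l.length) ↔ l.Nodup := by
  induction l using List.reverseRecOn with
  | nil => simp
  | append_singleton l x ih =>
    rw [PySem.Set.ofList_append_singleton, PySem.Set.add_eq_ite,
      List.length_append, List.length_singleton]
    by_cases hx : x ∈ PySem.Set.ofList l
    · have hxl : x ∈ l := (PySem.Set.mem_ofList _ _).1 hx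
      have hle := PySem.Set.length_ofList_le (xs := l)
      rw [if_pos hx]
      constructor
      · intro h; omega
      · intro hnd; exfalso
        rcases List.nodup_append.mp hnd with ⟨-, -, hd⟩
        exact hd x hxl x (by simp) rfl
    · have hxl : x ∉ l := fun h => hx ((PySem.Set.mem_ofList _ _).2 h)
      rw [if_neg hx, List.length_append, List.length_singleton]
      constructor
      · intro h'
        refine List.nodup_append.mpr ⟨ih.1 (by omega), List.nodup_singleton x, ?_⟩
        intro a ha b hb heq
        rw [List.mem_singleton] at hb
        exact hxl (by rw [← hb, ← heq]; exact ha)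
      · intro hnd
        rcases List.nodup_append.mp hnd with ⟨h1, -, -⟩
        rw [ih.2 h1]

theorem pvScanRow_eq (row : List Int) (seen : PySem.Set Int) (h : seen.Nodup) :
    pvScanRow seen row = if (seen ++ row).Nodup then some (seen ++ row) else none := by
  induction row generalizing seen with
  | nil => simp [pvScanRow, h]
  | cons x xs ih =>
    rw [pvScanRow]
    by_cases hx : x ∈ seen
    · have hnot : ¬ (seen ++ x :: xs).Nodup := by
        intro hn
        rcases List.nodup_append.mp hn with ⟨-, -, hd⟩
        exact hd x hx x (by simp) rfl
      rw [if_pos ((PySem.Set.contains_iff _ _).mpr hx), if_neg hnot]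
    · have hn2 : (seen ++ [x]).Nodup := by
        refine List.nodup_append.mpr ⟨h, List.nodup_singleton x, ?_⟩
        intro a ha b hb heq
        rw [List.mem_singleton] at hb
        exact hx (by rw [← hb, ← heq]; exact ha)
      rw [if_neg (fun hc => hx ((PySem.Set.contains_iff _ _).mp hc)),
        PySem.Set.add_of_not_mem hx, ih (seen ++ [x]) hn2]
      simp

theorem pvScanRows_eq (rows : List (List Int)) (seen : PySem.Set Int) (h : seen.Nodup) :
    pvScanRows seen rows = if (seen ++ rows.flatten).Nodup then "Unique" else "Not unique" := by
  induction rows generalizing seen with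
  | nil => simp [pvScanRows, h]
  | cons r rs ih =>
    rw [pvScanRows, pvScanRow_eq r seen h, List.flatten_cons]
    by_cases hr : (seen ++ r).Nodup
    · rw [if_pos hr]
      simp only [ih (seen ++ r) hr, List.append_assoc]
    · rw [if_neg hr]
      have hsub : (seen ++ r).Sublist (seen ++ (r ++ rs.flatten)) := by
        rw [← List.append_assoc]
        exact List.sublist_append_left _ _
      rw [if_neg (fun hn => hr (hn.sublist hsub))]

theorem pvA_run (array : List (List Int)) :
    check_uniqueness_array array = if array.flatten.Nodup then "Unique" else "Not unique" := by
  unfold check_uniqueness_array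
  simp only [PySem.List.len_eq]
  have hinner : ∀ (row res : List Int),
      (PySem.List.pyRange 0 ((row.length : Int))).foldl
        (fun res y => res ++ [PySem.List.pyGetD row y 0]) res = res ++ row := by
    intro row res
    have h := PySem.List.foldl_pyRange_zero_pyGetD' (xs := row) (d := (0 : Int))
      (f := fun (acc : List Int) v => acc ++ [v]) (init := res)
    exact h.trans (PySem.List.foldl_append_singleton_eq_self row res)
  simp only [hinner]
  have hfun : (fun (st : List Int × Int) i =>
        ((st.1 ++ PySem.List.pyGetD array i [] : List Int),
          st.2 + ((PySem.List.pyGetD array i []).length : Int)))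
      = fun (st : List Int × Int) i =>
        (fun (st : List Int × Int) (row : List Int) =>
          ((st.1 ++ row : List Int), st.2 + (row.length : Int))) st
          (PySem.List.pyGetD array i []) := rfl
  rw [hfun, PySem.List.foldl_pyRange_zero_pyGetD' (xs := array) (d := ([] : List Int))
    (f := fun (st : List Int × Int) (row : List Int) =>
      ((st.1 ++ row : List Int), st.2 + (row.length : Int))) (init := (([] : List Int), (0 : Int)))]
  rw [pvA_foldl]
  simp only [List.nil_append, Int.zero_add, PySem.Set.len, beq_iff_eq,
    Int.natCast_inj]
  by_cases hn : array.flatten.Nodup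
  · rw [if_pos ((pvOfList_length_iff _).mpr hn), if_pos hn]
  · rw [if_neg (fun h => hn ((pvOfList_length_iff _).mp h)), if_neg hn]

theorem pvB_run (array : List (List Int)) :
    check_uniqueness_array_alt array = if array.flatten.Nodup then "Unique" else "Not unique" := by
  unfold check_uniqueness_array_alt
  rw [pvScanRows_eq array PySem.Set.empty (by simp [PySem.Set.empty])]
  simp [PySem.Set.empty]

-- ===== VERDICT (by name: the statement is the Claim_ definition above) =====
theorem check_uniqueness_array_spec : Claim_equal_check_uniqueness_array := by
  intro array _
  unfold Spec_check_uniqueness_array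
  rw [pvA_run, pvB_run]
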